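-- pv_equiv track=rewrite | github.com/srivatsansoma/pravahan | pravahan_pi/can_decoder.py | decode_littleend_sig
-- ===== SOURCE A (Python) =====
-- def get_bit_val(bytes_array, byte_pos, bit_pos):
--     return (bytes_array[byte_pos] >> bit_pos) & 1
--
-- def decode_littleend_sig(bytes_array, start, len):
--     val = 0
--     byte = start // 8
--     bit = start - byte * 8
--
--     for i in range(len):
--         val = val | (get_bit_val(bytes_array, byte, bit) << i)
--         if bit == 7:
--             bit = 0
--             byte += 1
--         else:
--             bit += 1
--
--     return val
-- ===== SOURCE B (Python) =====
-- def decode_littleend_sig(bytes_array, start, len):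
--     # Horner accumulation from the most-significant bit down: visit the bit
--     # positions in reverse and fold each bit in with val = (val << 1) | bit.
--     val = 0
--     for p in range(start + len - 1, start - 1, -1):
--         val = (val << 1) | ((bytes_array[p // 8] >> (p % 8)) & 1)
--     return val
-- ===== Notes on version B (the rewrite author's own statement) =====
-- stated objective: alternative
-- what changed: Replaces A's forward per-bit loop with a running byte/bit cursor and OR-at-position-i accumulation by a reverse traversal of the bit positions with Horner accumulation (val = (val << 1) | bit) and direct p//8, p%8 index arithmetic, with no cursor state.
import Mathlib
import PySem

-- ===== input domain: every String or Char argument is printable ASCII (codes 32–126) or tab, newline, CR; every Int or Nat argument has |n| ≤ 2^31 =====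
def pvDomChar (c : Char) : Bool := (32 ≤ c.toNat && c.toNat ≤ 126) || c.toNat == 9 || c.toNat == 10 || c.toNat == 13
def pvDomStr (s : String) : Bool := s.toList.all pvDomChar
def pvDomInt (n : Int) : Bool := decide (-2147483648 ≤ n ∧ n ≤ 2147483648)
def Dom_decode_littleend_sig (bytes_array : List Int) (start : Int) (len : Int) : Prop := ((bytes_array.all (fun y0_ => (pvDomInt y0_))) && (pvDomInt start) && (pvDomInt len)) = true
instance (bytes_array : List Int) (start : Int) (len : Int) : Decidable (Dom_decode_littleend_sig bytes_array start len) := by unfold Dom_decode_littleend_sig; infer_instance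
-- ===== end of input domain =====

-- B decodes the same little-endian bitfield by a reverse Horner scan over bit positions
-- (val = (val << 1) | bit, indices computed as p//8, p%8) instead of A's forward per-bit
-- loop with a running byte/bit cursor; an alternative decomposition, not claimed faster.


-- ===== PORT A =====
-- bytes_array[byte_pos] is ported with pyGetD (default 0): faithful exactly under
-- Pre_, which states that every accessed index is in Python's (negative-wrapping) range.
def get_bit_val (bytes_array : List Int) (byte_pos : Int) (bit_pos : Int) : Int :=
  PySem.Int.band ((PySem.List.pyGetD bytes_array byte_pos 0) >>> bit_pos.toNat) 1

def decode_littleend_sig (bytes_array : List Int) (start : Int) (len : Int) : Int :=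
  let byte0 := PySem.Int.floordiv start 8
  let r := (PySem.List.pyRange 0 len 1).foldl
    (fun (s : Int × Int × Int) i =>
      let val := PySem.Int.bor s.1 ((get_bit_val bytes_array s.2.1 s.2.2) <<< i.toNat)
      if s.2.2 = 7 then (val, s.2.1 + 1, 0) else (val, s.2.1, s.2.2 + 1))
    (0, byte0, start - byte0 * 8)
  r.1

-- ===== PORT B =====
def decode_littleend_sig_alt (bytes_array : List Int) (start : Int) (len : Int) : Int :=
  (PySem.List.pyRange (start + len - 1) (start - 1) (-1)).foldl
    (fun val p =>
      PySem.Int.bor (val <<< (1 : Nat))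
        (PySem.Int.band ((PySem.List.pyGetD bytes_array (PySem.Int.floordiv p 8) 0)
            >>> (PySem.Int.mod p 8).toNat) 1))
    0

-- ===== PRECONDITION & SPEC =====
-- Pre_ excludes exactly the inputs on which Python A raises IndexError: when at least one
-- bit is read, the first and last visited byte indices (hence all of them) must be in
-- Python's negative-wrapping range.
def Pre_decode_littleend_sig (bytes_array : List Int) (start : Int) (len : Int) : Prop :=
  0 < len →
    PySem.Raise.InRange bytes_array.length (PySem.Int.floordiv start 8) ∧
    PySem.Raise.InRange bytes_array.length (PySem.Int.floordiv (start + len - 1) 8)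
instance (bytes_array : List Int) (start : Int) (len : Int) : Decidable (Pre_decode_littleend_sig bytes_array start len) := by unfold Pre_decode_littleend_sig; infer_instance

def pvWitness_decode_littleend_sig : List Int × Int × Int := ([18, 52], 4, 8)

def Spec_decode_littleend_sig (bytes_array : List Int) (start : Int) (len : Int) (out : Int) : Prop := out = decode_littleend_sig_alt bytes_array start len
instance (bytes_array : List Int) (start : Int) (len : Int) (out : Int) : Decidable (Spec_decode_littleend_sig bytes_array start len out) := by unfold Spec_decode_littleend_sig; infer_instance

-- ===== CLAIM (what is proved, stated in full; the proofs are below) =====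
def Claim_equal_decode_littleend_sig : Prop := ∀ (bytes_array : List Int) (start : Int) (len : Int), Dom_decode_littleend_sig bytes_array start len → Pre_decode_littleend_sig bytes_array start len → Spec_decode_littleend_sig bytes_array start len (decode_littleend_sig bytes_array start len)

-- ===== LEMMAS AND PROOFS =====

-- the bit of bytes_array at absolute bit position p, as both programs read it
def pvBitAt (xs : List Int) (p : Int) : Int :=
  PySem.Int.band ((PySem.List.pyGetD xs (PySem.Int.floordiv p 8) 0) >>> (PySem.Int.mod p 8).toNat) 1

-- reference value: the n bits starting at position p, little-endian
def pvSpecBits (xs : List Int) : Int → Nat → Int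
  | _, 0 => 0
  | p, n + 1 => pvBitAt xs p + 2 * pvSpecBits xs (p + 1) n

theorem pvBitAt_bounds (xs : List Int) (p : Int) : 0 ≤ pvBitAt xs p ∧ pvBitAt xs p < 2 := by
  unfold pvBitAt
  rw [PySem.Int.band_one, PySem.Int.mod_eq_emod_of_pos (by omega)]
  omega

theorem pv_natL (k m n : Nat) (hm : m < 2 ^ k) : m ||| (n <<< k) = m + n * 2 ^ k := by
  apply Nat.eq_of_testBit_eq
  intro j
  have h2 : m + n * 2 ^ k = 2 ^ k * n + m := by ring
  rw [h2, Nat.testBit_two_pow_mul_add n hm j, Nat.testBit_lor, Nat.testBit_shiftLeft]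
  by_cases h : j < k
  · simp [h, Nat.not_le.mpr h]
  · have hmj : m.testBit j = false :=
      Nat.testBit_eq_false_of_lt
        (lt_of_lt_of_le hm (Nat.pow_le_pow_right (by norm_num) (Nat.le_of_not_lt h)))
    simp [h, hmj, Nat.le_of_not_lt h]

theorem pv_intL (k : Nat) (a b : Int) (ha : 0 ≤ a) (hk : a < 2 ^ k) (hb : 0 ≤ b) :
    PySem.Int.bor a (b <<< k) = a + b * 2 ^ k := by
  obtain ⟨m, rfl⟩ := Int.eq_ofNat_of_zero_le ha
  obtain ⟨n, rfl⟩ := Int.eq_ofNat_of_zero_le hb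
  have hbk : ((n : Int)) <<< k = ((n <<< k : Nat) : Int) := by
    rw [Int.shiftLeft_eq' (n : Int) k, Nat.shiftLeft_eq]
    push_cast; ring
  rw [hbk, PySem.Int.bor_natCast]
  have hm : m < 2 ^ k := by exact_mod_cast hk
  rw [pv_natL k m n hm]
  push_cast [Nat.shiftLeft_eq]
  ring

-- advancing one bit position
theorem pv_pos_step (p : Int) :
    (PySem.Int.mod p 8 = 7 →
      PySem.Int.floordiv (p + 1) 8 = PySem.Int.floordiv p 8 + 1 ∧ PySem.Int.mod (p + 1) 8 = 0) ∧
    (PySem.Int.mod p 8 ≠ 7 →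
      PySem.Int.floordiv (p + 1) 8 = PySem.Int.floordiv p 8 ∧
        PySem.Int.mod (p + 1) 8 = PySem.Int.mod p 8 + 1) := by
  rw [PySem.Int.mod_eq_emod_of_pos (a := p) (by omega),
      PySem.Int.mod_eq_emod_of_pos (a := p + 1) (by omega),
      PySem.Int.floordiv_eq_ediv_of_pos (a := p) (by omega),
      PySem.Int.floordiv_eq_ediv_of_pos (a := p + 1) (by omega)]
  omega

-- A's loop invariant: folding the remaining indices [i, len) from a cursor at bit position p
theorem pvA_loop (xs : List Int) (n : Nat) : ∀ (i len p val : Int),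
    (len - i).toNat = n → 0 ≤ i → 0 ≤ val → val < 2 ^ i.toNat →
    ((PySem.List.pyRange i len 1).foldl
      (fun (s : Int × Int × Int) j =>
        let v := PySem.Int.bor s.1 ((get_bit_val xs s.2.1 s.2.2) <<< j.toNat)
        if s.2.2 = 7 then (v, s.2.1 + 1, 0) else (v, s.2.1, s.2.2 + 1))
      (val, PySem.Int.floordiv p 8, PySem.Int.mod p 8)).1
    = val + pvSpecBits xs p n * 2 ^ i.toNat := by
  induction n with
  | zero =>
    intro i len p val hn _ _ _
    rw [PySem.List.pyRange_one_eq_nil (by omega)]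
    simp [pvSpecBits]
  | succ n ih =>
    intro i len p val hn hi hv0 hvlt
    rw [PySem.List.pyRange_one_cons (by omega)]
    simp only [List.foldl_cons]
    have hb := pvBitAt_bounds xs p
    have hval : PySem.Int.bor val ((get_bit_val xs (PySem.Int.floordiv p 8) (PySem.Int.mod p 8)) <<< ((i.toNat : Int)))
        = val + pvBitAt xs p * 2 ^ i.toNat := by
      rw [Int.shiftLeft_natCast_right]
      have hmodnn : 0 ≤ PySem.Int.mod p 8 := by
        rw [PySem.Int.mod_eq_emod_of_pos (by omega)]; omega
      have hg : get_bit_val xs (PySem.Int.floordiv p 8) (PySem.Int.mod p 8) = pvBitAt xs p := rfl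
      rw [hg]
      exact pv_intL i.toNat val (pvBitAt xs p) hv0 hvlt hb.1
    have hstep := pv_pos_step p
    have hnewval0 : 0 ≤ val + pvBitAt xs p * 2 ^ i.toNat := by
      have h := mul_nonneg hb.1 (pow_nonneg (by norm_num : (0:Int) ≤ 2) i.toNat)
      omega
    have hnewvallt : val + pvBitAt xs p * 2 ^ i.toNat < 2 ^ (i + 1).toNat := by
      have h1 : (i + 1).toNat = i.toNat + 1 := by omega
      have h2 : (2 : Int) ^ (i.toNat + 1) = 2 * 2 ^ i.toNat := by ring
      rw [h1, h2]
      have hple : pvBitAt xs p * 2 ^ i.toNat ≤ 1 * 2 ^ i.toNat := by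
        apply mul_le_mul_of_nonneg_right (by omega) (by positivity)
      omega
    by_cases hbit : PySem.Int.mod p 8 = 7
    · rw [if_pos hbit]
      have h7 := hstep.1 hbit
      rw [hval]
      rw [show ((val + pvBitAt xs p * 2 ^ i.toNat, PySem.Int.floordiv p 8 + 1, (0:Int)))
            = ((val + pvBitAt xs p * 2 ^ i.toNat, PySem.Int.floordiv (p+1) 8, PySem.Int.mod (p+1) 8)) by
          rw [h7.1, h7.2]]
      rw [ih (i + 1) len (p + 1) _ (by omega) (by omega) hnewval0 hnewvallt]
      have h1 : (i + 1).toNat = i.toNat + 1 := by omega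
      simp only [pvSpecBits, h1]
      ring
    · rw [if_neg hbit]
      have h7 := hstep.2 hbit
      rw [hval]
      rw [show ((val + pvBitAt xs p * 2 ^ i.toNat, PySem.Int.floordiv p 8, PySem.Int.mod p 8 + 1))
            = ((val + pvBitAt xs p * 2 ^ i.toNat, PySem.Int.floordiv (p+1) 8, PySem.Int.mod (p+1) 8)) by
          rw [h7.1, h7.2]]
      rw [ih (i + 1) len (p + 1) _ (by omega) (by omega) hnewval0 hnewvallt]
      have h1 : (i + 1).toNat = i.toNat + 1 := by omega
      simp only [pvSpecBits, h1]
      ring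

theorem pvA_eq_spec (xs : List Int) (start len : Int) :
    decode_littleend_sig xs start len = pvSpecBits xs start len.toNat := by
  unfold decode_littleend_sig
  have hmod : start - PySem.Int.floordiv start 8 * 8 = PySem.Int.mod start 8 := by
    have := PySem.Int.floordiv_mul_add_mod start 8
    omega
  simp only [hmod]
  have := pvA_loop xs len.toNat 0 len start 0 (by omega) (by omega) (by omega) (by norm_num)
  simpa using this

-- appending a bit at the high end of the reference value
theorem pvSpecBits_succ_high (xs : List Int) (n : Nat) : ∀ (q : Int),
    pvSpecBits xs q (n + 1) = pvSpecBits xs q n + pvBitAt xs (q + n) * 2 ^ n := by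
  induction n with
  | zero => intro q; simp [pvSpecBits]
  | succ n ih =>
    intro q
    have h1 : pvSpecBits xs q (n + 1 + 1) = pvBitAt xs q + 2 * pvSpecBits xs (q + 1) (n + 1) := rfl
    rw [h1, ih (q + 1)]
    have h2 : pvSpecBits xs q (n + 1) = pvBitAt xs q + 2 * pvSpecBits xs (q + 1) n := rfl
    rw [h2]
    have h3 : q + 1 + (n : Int) = q + ((n : Nat) + 1 : Nat) := by push_cast; ring
    rw [h3]
    ring

-- B's loop invariant: Horner fold over positions p down to stop+1
theorem pvB_loop (xs : List Int) (n : Nat) : ∀ (p stop val : Int),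
    (p - stop).toNat = n → 0 ≤ val →
    (PySem.List.pyRange p stop (-1)).foldl
      (fun v q =>
        PySem.Int.bor (v <<< (1 : Nat))
          (PySem.Int.band ((PySem.List.pyGetD xs (PySem.Int.floordiv q 8) 0)
              >>> (PySem.Int.mod q 8).toNat) 1))
      val
    = val * 2 ^ n + pvSpecBits xs (stop + 1) n := by
  induction n with
  | zero =>
    intro p stop val hn _
    rw [PySem.List.pyRange_neg_one_eq_nil (by omega)]
    simp [pvSpecBits]
  | succ n ih =>
    intro p stop val hn hv0
    rw [PySem.List.pyRange_neg_one_cons (by omega)]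
    simp only [List.foldl_cons]
    have hb := pvBitAt_bounds xs p
    have hbit : PySem.Int.band ((PySem.List.pyGetD xs (PySem.Int.floordiv p 8) 0)
        >>> (PySem.Int.mod p 8).toNat) 1 = pvBitAt xs p := rfl
    have hstep : PySem.Int.bor (val <<< (1 : Nat)) (pvBitAt xs p) = pvBitAt xs p + 2 * val := by
      rw [PySem.Int.bor_comm]
      have h := pv_intL 1 (pvBitAt xs p) val hb.1 (by simpa using hb.2) hv0
      rw [h]; ring
    rw [hbit, hstep, ih (p - 1) stop (pvBitAt xs p + 2 * val) (by omega) (by omega)]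
    have hq : stop + 1 + (n : Int) = p := by omega
    rw [pvSpecBits_succ_high xs n (stop + 1), hq]
    ring

theorem pvB_eq_spec (xs : List Int) (start len : Int) :
    decode_littleend_sig_alt xs start len = pvSpecBits xs start len.toNat := by
  unfold decode_littleend_sig_alt
  have := pvB_loop xs len.toNat (start + len - 1) (start - 1) 0 (by omega) (by omega)
  simpa using this

-- ===== VERDICT (by name: the statement is the Claim_ definition above) =====
theorem decode_littleend_sig_spec : Claim_equal_decode_littleend_sig := by
  intro xs start len _ _
  unfold Spec_decode_littleend_sig
  rw [pvA_eq_spec, pvB_eq_spec]
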